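-- pv_equiv track=rewrite | github.com/jkjan/PS | Programmers/Level 3/불량 사용자.py | bfs
-- ===== SOURCE A (Python) =====
-- from collections import deque
--
-- def bfs(every_possible_banned):
--     will_visit = deque()
--     will_visit.append((frozenset(), 0))
--     cases = set()
--
--     while 0 < len(will_visit):
--         case, idx = will_visit.popleft()
--         if idx == len(every_possible_banned):
--             cases.add(case)
--             continue
--         for possible_id in every_possible_banned[idx]:
--             if possible_id not in case:
--                 will_visit.append((case.union({possible_id}), idx + 1))
--     return len(cases)
-- ===== SOURCE B (Python) =====
-- def bfs(every_possible_banned):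
--     # Level-by-level fold over the distinct partial frozensets of each level.
--     states = [frozenset()]
--     for row in every_possible_banned:
--         states = list({s | {pid} for s in states for pid in row if pid not in s})
--     return len(states)
-- ===== Notes on version B (the rewrite author's own statement) =====
-- stated objective: alternative
-- what changed: Replaces the BFS over a queue of all partial paths by a level-by-level fold that keeps only the set of distinct partial frozensets at each level, expanding each distinct partial set once.
import Mathlib
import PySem

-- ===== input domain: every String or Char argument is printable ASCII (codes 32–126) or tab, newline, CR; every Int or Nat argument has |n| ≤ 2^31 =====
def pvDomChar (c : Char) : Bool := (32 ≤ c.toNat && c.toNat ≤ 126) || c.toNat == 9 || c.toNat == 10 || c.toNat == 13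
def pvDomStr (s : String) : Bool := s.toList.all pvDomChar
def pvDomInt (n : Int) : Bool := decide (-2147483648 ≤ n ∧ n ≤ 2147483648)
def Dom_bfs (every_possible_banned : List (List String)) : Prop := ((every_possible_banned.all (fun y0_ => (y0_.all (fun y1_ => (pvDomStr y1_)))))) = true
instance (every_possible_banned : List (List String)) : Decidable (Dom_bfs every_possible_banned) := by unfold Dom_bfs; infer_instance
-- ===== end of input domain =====

-- B replaces A's path-by-path BFS queue by a level-by-level fold over the set of
-- distinct partial frozensets of each level (alternative decomposition, same value).


-- ===== PORT A =====
-- frozenset of strings is modelled as a sorted duplicate-free List String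
-- (exact for the operations used: membership, union with a fresh singleton,
-- and equality — two frozensets are equal iff their canonical sorted lists are).
def fsInsert (x : String) : List String → List String
  | [] => [x]
  | y :: ys => if x < y then x :: y :: ys else y :: fsInsert x ys

-- termination weight of one queue entry: number of nodes of the remaining search tree bound
def pvWt : List (List String) → Nat
  | [] => 1
  | r :: rs => 1 + r.length * pvWt rs

def pvMeasure (rows : List (List String)) (q : List (List String × Nat)) : Nat :=
  (q.map (fun e => pvWt (rows.drop e.2))).sum

theorem pvMeasure_dec_done (rows : List (List String)) (case : List String)
    (rest : List (List String × Nat)) :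
    pvMeasure rows rest < pvMeasure rows ((case, rows.length) :: rest) := by
  simp [pvMeasure, pvWt, List.drop_eq_nil_of_le (le_refl rows.length)]

theorem pvMeasure_dec_step (rows : List (List String)) (case : List String) (idx : Nat)
    (rest : List (List String × Nat)) (_hne : idx ≠ rows.length) :
    pvMeasure rows (rest ++ ((rows.getD idx []).filter (fun pid => decide (pid ∉ case))).map
        (fun pid => (fsInsert pid case, idx + 1))) <
      pvMeasure rows ((case, idx) :: rest) := by
  simp only [pvMeasure, List.map_append, List.sum_append, List.map_cons, List.sum_cons,
    List.map_map, Function.comp_def, List.map_const', List.sum_replicate, smul_eq_mul]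
  by_cases hlt : idx < rows.length
  · have hdrop : rows.drop idx = rows[idx] :: rows.drop (idx + 1) :=
      List.drop_eq_getElem_cons hlt
    have hget : rows.getD idx [] = rows[idx] := List.getD_eq_getElem rows [] hlt
    rw [hdrop, hget]
    have hlen : (rows[idx].filter (fun pid => decide (pid ∉ case))).length ≤ rows[idx].length :=
      List.length_filter_le _ _
    have := Nat.mul_le_mul_right (pvWt (rows.drop (idx + 1))) hlen
    simp only [pvWt]
    omega
  · have hge : rows.length ≤ idx := Nat.le_of_not_lt hlt
    have hget : rows.getD idx [] = [] := List.getD_eq_default rows [] (by omega)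
    have hdrop : rows.drop idx = [] := List.drop_eq_nil_of_le hge
    simp only [hget, hdrop, pvWt, List.filter_nil, List.length_nil, Nat.zero_mul]
    omega

def bfsGo (rows : List (List String)) (q : List (List String × Nat))
    (cases : PySem.Set (List String)) : PySem.Set (List String) :=
  match q with
  | [] => cases
  | (case, idx) :: rest =>
    if _h : idx = rows.length then
      bfsGo rows rest (cases.add case)
    else
      bfsGo rows (rest ++ ((rows.getD idx []).filter (fun pid => decide (pid ∉ case))).map
        (fun pid => (fsInsert pid case, idx + 1))) cases
termination_by pvMeasure rows q
decreasing_by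
  · exact _h ▸ pvMeasure_dec_done rows case rest
  · exact pvMeasure_dec_step rows case idx rest _h

def bfs (every_possible_banned : List (List String)) : Int :=
  ((bfsGo every_possible_banned [([], 0)] PySem.Set.empty).length : Int)

-- ===== PORT B =====
def bfsAltStep (states : List (List String)) (row : List String) : List (List String) :=
  PySem.Set.ofList (states.flatMap (fun s => (row.filter (fun pid => decide (pid ∉ s))).map
    (fun pid => fsInsert pid s)))

def bfs_alt (every_possible_banned : List (List String)) : Int :=
  ((every_possible_banned.foldl bfsAltStep [[]]).length : Int)

-- ===== PRECONDITION & SPEC =====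
def Spec_bfs (every_possible_banned : List (List String)) (out : Int) : Prop := out = bfs_alt every_possible_banned
instance (every_possible_banned : List (List String)) (out : Int) : Decidable (Spec_bfs every_possible_banned out) := by unfold Spec_bfs; infer_instance

-- ===== CLAIM (what is proved, stated in full; the proofs are below) =====
def Claim_equal_bfs : Prop := ∀ (every_possible_banned : List (List String)), Dom_bfs every_possible_banned → Spec_bfs every_possible_banned (bfs every_possible_banned)

-- ===== LEMMAS AND PROOFS =====
-- all completed frozensets reachable from partial set s through the remaining rows
def pvExpand (s : List String) : List (List String) → List (List String)
  | [] => [s]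
  | r :: rs => ((r.filter (fun pid => decide (pid ∉ s))).map (fun pid => fsInsert pid s)).flatMap
      (fun s' => pvExpand s' rs)

theorem bfsGo_mem (rows : List (List String)) (q : List (List String × Nat))
    (cases : PySem.Set (List String)) :
    ∀ x : List String, (∀ e ∈ q, e.2 ≤ rows.length) →
    (x ∈ bfsGo rows q cases ↔ x ∈ cases ∨ ∃ e ∈ q, x ∈ pvExpand e.1 (rows.drop e.2)) := by
  induction q, cases using bfsGo.induct rows with
  | case1 cases => intro x _; simp [bfsGo]
  | case2 cases case rest ih =>
    intro x hq
    rw [bfsGo]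
    rw [dif_pos rfl]
    rw [ih x (fun e he => hq e (List.mem_cons_of_mem _ he))]
    have hdrop : rows.drop rows.length = ([] : List (List String)) :=
      List.drop_eq_nil_of_le (le_refl _)
    simp only [List.mem_cons, PySem.Set.mem_add]
    constructor
    · rintro (⟨hx | hx⟩ | ⟨e, he, hx⟩)
      · exact Or.inl hx
      · exact Or.inr ⟨(case, rows.length), Or.inl rfl, by simpa [hdrop, pvExpand] using hx⟩
      · exact Or.inr ⟨e, Or.inr he, hx⟩
    · rintro (hx | ⟨e, he | he, hx⟩)
      · exact Or.inl (Or.inl hx)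
      · subst he; exact Or.inl (Or.inr (by simpa [hdrop, pvExpand] using hx))
      · exact Or.inr ⟨e, he, hx⟩
  | case3 cases case idx rest h ih =>
    intro x hq
    have hidx : idx < rows.length := by
      have := hq (case, idx) (List.mem_cons_self)
      omega
    rw [bfsGo]
    simp only [dif_neg h]
    rw [ih x ?hq']
    case hq' =>
      intro e he
      rcases List.mem_append.1 he with h1 | h1
      · exact hq e (List.mem_cons_of_mem _ h1)
      · rcases List.mem_map.1 h1 with ⟨pid, _, rfl⟩
        simpa using hidx
    have hdrop : rows.drop idx = rows[idx] :: rows.drop (idx + 1) :=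
      List.drop_eq_getElem_cons hidx
    have hget : rows.getD idx [] = rows[idx] := List.getD_eq_getElem rows [] hidx
    constructor
    · rintro (hx | ⟨e, he, hx⟩)
      · exact Or.inl hx
      rcases List.mem_append.1 he with h1 | h1
      · exact Or.inr ⟨e, List.mem_cons_of_mem _ h1, hx⟩
      rcases List.mem_map.1 h1 with ⟨pid, hpid, rfl⟩
      refine Or.inr ⟨(case, idx), List.mem_cons_self, ?_⟩
      rw [hdrop]
      simp only [pvExpand, List.mem_flatMap]
      exact ⟨fsInsert pid case, List.mem_map.2 ⟨pid, by simpa [List.getD_eq_getElem?_getD, List.getElem?_eq_getElem hidx] using hpid, rfl⟩, hx⟩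
    · rintro (hx | ⟨e, he, hx⟩)
      · exact Or.inl hx
      rcases List.mem_cons.1 he with rfl | h1
      · rw [hdrop] at hx
        simp only [pvExpand, List.mem_flatMap] at hx
        rcases hx with ⟨s', hs', hx⟩
        rcases List.mem_map.1 hs' with ⟨pid, hpid, rfl⟩
        refine Or.inr ⟨(fsInsert pid case, idx + 1), List.mem_append.2 (Or.inr ?_), hx⟩
        exact List.mem_map.2 ⟨pid, by simpa [List.getD_eq_getElem?_getD, List.getElem?_eq_getElem hidx] using hpid, rfl⟩
      · exact Or.inr ⟨e, List.mem_append.2 (Or.inl h1), hx⟩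

theorem bfsGo_nodup (rows : List (List String)) (q : List (List String × Nat))
    (cases : PySem.Set (List String)) : cases.Nodup → (bfsGo rows q cases).Nodup := by
  induction q, cases using bfsGo.induct rows with
  | case1 cases => intro h; rw [bfsGo]; exact h
  | case2 cases case rest ih =>
    intro h
    rw [bfsGo, dif_pos rfl]
    exact ih (PySem.Set.nodup_add _ _ h)
  | case3 cases case idx rest heq ih =>
    intro h
    rw [bfsGo]; simp only [dif_neg heq]
    exact ih h

theorem foldl_step_mem (rs : List (List String)) (states : List (List String)) (x : List String) :
    x ∈ rs.foldl bfsAltStep states ↔ ∃ s ∈ states, x ∈ pvExpand s rs := by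
  induction rs generalizing states with
  | nil => simp [pvExpand]
  | cons r rest ih =>
    rw [List.foldl_cons, ih]
    constructor
    · rintro ⟨s', hs', hx⟩
      rw [bfsAltStep, PySem.Set.mem_ofList, List.mem_flatMap] at hs'
      rcases hs' with ⟨s, hs, hchild⟩
      exact ⟨s, hs, by simp only [pvExpand, List.mem_flatMap]; exact ⟨s', hchild, hx⟩⟩
    · rintro ⟨s, hs, hx⟩
      simp only [pvExpand, List.mem_flatMap] at hx
      rcases hx with ⟨s', hchild, hx⟩
      refine ⟨s', ?_, hx⟩
      rw [bfsAltStep, PySem.Set.mem_ofList, List.mem_flatMap]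
      exact ⟨s, hs, hchild⟩

theorem foldl_step_nodup (rs : List (List String)) (states : List (List String))
    (h : states.Nodup) : (rs.foldl bfsAltStep states).Nodup := by
  induction rs generalizing states with
  | nil => exact h
  | cons r rest ih => exact ih _ (PySem.Set.nodup_ofList _)

-- ===== VERDICT (by name: the statement is the Claim_ definition above) =====
theorem bfs_spec : Claim_equal_bfs := by
  intro rows _
  unfold Spec_bfs bfs bfs_alt
  congr 1
  have hA := bfsGo_nodup rows [([], 0)] PySem.Set.empty List.nodup_nil
  have hB := foldl_step_nodup rows [[]] (by simp)
  have hperm : (bfsGo rows [([], 0)] PySem.Set.empty).Perm (rows.foldl bfsAltStep [[]]) := by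
    rw [List.perm_ext_iff_of_nodup hA hB]
    intro x
    rw [bfsGo_mem rows _ _ x (by simp), foldl_step_mem]
    simp [PySem.Set.empty]
  exact hperm.length_eq
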